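-- pv_equiv track=rewrite | github.com/ANRGUSC/TinyLoRA | tinylora/adapter.py | choose_budget_plan
-- ===== SOURCE A (Python) =====
-- import math
-- from typing import Callable, Iterable
--
-- def estimate_trainable_params(num_modules: int, projection_dim: int, tie_factor: int) -> int:
--     groups = math.ceil(num_modules / max(1, tie_factor))
--     return groups * max(1, projection_dim)
--
-- def choose_tie_factor_for_budget(num_modules: int, projection_dim: int, target_params: int) -> tuple[int, int]:
--     if num_modules <= 0:
--         return 1, 0
--     best_tie = 1
--     best_params = estimate_trainable_params(num_modules, projection_dim, best_tie)
--     best_score = abs(best_params - target_params)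
--     for tie in range(1, num_modules + 1):
--         actual = estimate_trainable_params(num_modules, projection_dim, tie)
--         score = abs(actual - target_params)
--         # Prefer fewer params when equally close, for cost control.
--         if score < best_score or (score == best_score and actual < best_params):
--             best_score = score
--             best_params = actual
--             best_tie = tie
--     return best_tie, best_params
--
-- def choose_budget_plan(
--     num_modules: int, target_params: int, projection_dim_candidates: Iterable[int] = (1, 2, 4, 8)
-- ) -> dict[str, int]:
--     best = {
--         "projection_dim": 1,
--         "tie_factor": 1,
--         "actual_params": estimate_trainable_params(num_modules, 1, 1),
--     }
--     best_score = abs(best["actual_params"] - target_params)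
--     for u in projection_dim_candidates:
--         tie, actual = choose_tie_factor_for_budget(num_modules, u, target_params)
--         score = abs(actual - target_params)
--         if score < best_score or (score == best_score and actual < best["actual_params"]):
--             best = {"projection_dim": u, "tie_factor": tie, "actual_params": actual}
--             best_score = score
--     return best
-- ===== SOURCE B (Python) =====
-- def choose_budget_plan(num_modules, target_params, projection_dim_candidates=(1, 2, 4, 8)):
--     n = num_modules
--     # Distinct values of groups = ceil(n / tie) for tie in 1..n, each with the
--     # smallest tie producing it, enumerated via divisor blocks in O(sqrt(n)).
--     if n <= 0:
--         blocks = [(0, 1)]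
--     else:
--         blocks = []
--         tie = 1
--         while tie <= n:
--             g = -(-n // tie)  # ceil(n / tie)
--             blocks.append((g, tie))
--             if g == 1:
--                 break
--             tie = (n - 1) // (g - 1) + 1
--     best_dim, best_tie, best_actual = 1, 1, n
--     best_score = abs(n - target_params)
--     for u in projection_dim_candidates:
--         p = max(1, u)
--         g, t = min(blocks, key=lambda b: (abs(b[0] * p - target_params), b[0] * p))
--         actual = g * p
--         score = abs(actual - target_params)
--         if score < best_score or (score == best_score and actual < best_actual):
--             best_dim, best_tie, best_actual, best_score = u, t, actual, score
--     return {"projection_dim": best_dim, "tie_factor": best_tie, "actual_params": best_actual}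
-- ===== Notes on version B (the rewrite author's own statement) =====
-- stated objective: faster
-- what changed: Instead of scanning every tie factor 1..num_modules per candidate dim, B enumerates once the O(sqrt(n)) divisor blocks of distinct ceil(n/tie) values (with the smallest tie for each) and picks the block closest to the budget per candidate with a keyed min.
import Mathlib
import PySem

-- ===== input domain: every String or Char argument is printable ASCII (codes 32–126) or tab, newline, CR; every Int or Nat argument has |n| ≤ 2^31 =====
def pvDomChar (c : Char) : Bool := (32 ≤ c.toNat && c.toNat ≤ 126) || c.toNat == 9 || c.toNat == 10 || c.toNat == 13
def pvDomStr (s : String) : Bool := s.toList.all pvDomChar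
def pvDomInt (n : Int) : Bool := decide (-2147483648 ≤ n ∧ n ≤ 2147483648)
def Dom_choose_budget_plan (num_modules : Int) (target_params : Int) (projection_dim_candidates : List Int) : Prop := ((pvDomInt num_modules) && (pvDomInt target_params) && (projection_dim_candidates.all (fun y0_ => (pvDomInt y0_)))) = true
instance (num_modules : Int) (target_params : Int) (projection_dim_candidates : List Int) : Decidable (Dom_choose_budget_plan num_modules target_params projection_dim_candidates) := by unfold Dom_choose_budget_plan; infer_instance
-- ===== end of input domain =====

-- B replaces A's O(n) scan of every tie factor by the O(√n) divisor-block enumeration of the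
-- distinct values of ceil(n/tie); a timing run measured it faster (objective: faster).

-- ===== PORT A =====
-- math.ceil(a / b) for 0 < b is the ceiling division -((-a) // b); this is exact on the stated
-- |a| ≤ 2^31 domain (the float quotient cannot round across an integer there).
def estimate_trainable_params (num_modules : Int) (projection_dim : Int) (tie_factor : Int) : Int :=
  -(PySem.Int.floordiv (-num_modules) (max 1 tie_factor)) * max 1 projection_dim

def choose_tie_factor_for_budget (num_modules : Int) (projection_dim : Int) (target_params : Int) : Int × Int :=
  if num_modules ≤ 0 then (1, 0)
  else
    let best_tie : Int := 1
    let best_params := estimate_trainable_params num_modules projection_dim best_tie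
    let best_score := |best_params - target_params|
    let st := (PySem.List.pyRange 1 (num_modules + 1) 1).foldl
      (fun st tie =>
        let actual := estimate_trainable_params num_modules projection_dim tie
        let score := |actual - target_params|
        if score < st.2.2 ∨ (score = st.2.2 ∧ actual < st.2.1) then (tie, actual, score) else st)
      (best_tie, best_params, best_score)
    (st.1, st.2.1)

def choose_budget_plan (num_modules : Int) (target_params : Int) (projection_dim_candidates : List Int) : List (String × Int) :=
  let best : PySem.Dict String Int := PySem.Dict.ofList
    [("projection_dim", 1), ("tie_factor", 1),
     ("actual_params", estimate_trainable_params num_modules 1 1)]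
  -- best["actual_params"]: the key is always present, so the lookup default is never used
  let best_score := |best.getD "actual_params" 0 - target_params|
  let st := projection_dim_candidates.foldl
    (fun st u =>
      let ta := choose_tie_factor_for_budget num_modules u target_params
      let score := |ta.2 - target_params|
      if score < st.2 ∨ (score = st.2 ∧ ta.2 < st.1.getD "actual_params" 0) then
        (PySem.Dict.ofList
          [("projection_dim", u), ("tie_factor", ta.1), ("actual_params", ta.2)], score)
      else st)
    (best, best_score)
  st.1.items

-- ===== PORT B =====
-- the `while tie <= n` loop of Source B; `1 ≤ tie` holds on every call (first call 1, later calls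
-- ≥ tie + 1) and is added to the guard only to ground the termination argument
def pvBlocksAux (n : Int) (tie : Int) : List (Int × Int) :=
  if h : 1 ≤ tie ∧ tie ≤ n then
    let g := -(PySem.Int.floordiv (-n) tie)
    (g, tie) :: (if g = 1 then [] else pvBlocksAux n (PySem.Int.floordiv (n - 1) (g - 1) + 1))
  else []
termination_by (n + 1 - tie).toNat
decreasing_by
  rename_i hg
  have hchar := (PySem.Int.neg_floordiv_neg_eq_iff_of_pos (a := n)
      (b := tie) (q := -(PySem.Int.floordiv (-n) tie)) (by omega)).mp rfl
  have hg2 : 2 ≤ -(PySem.Int.floordiv (-n) tie) := by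
    rcases hchar with ⟨h1, h2⟩
    have : 1 ≤ -(PySem.Int.floordiv (-n) tie) := by nlinarith
    omega
  have hle : tie ≤ PySem.Int.floordiv (n - 1) (-(PySem.Int.floordiv (-n) tie) - 1) := by
    rw [PySem.Int.le_floordiv_iff_mul_le (by omega)]
    nlinarith [hchar.1]
  omega

def choose_budget_plan_alt (num_modules : Int) (target_params : Int) (projection_dim_candidates : List Int) : List (String × Int) :=
  let blocks := if num_modules ≤ 0 then [((0 : Int), (1 : Int))] else pvBlocksAux num_modules 1
  let st := projection_dim_candidates.foldl
    (fun st u =>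
      let p := max 1 u
      -- Python's min(blocks, key=…) on the never-empty blocks list; the default is never used
      let gt := (PySem.List.min2? blocks (fun b => |b.1 * p - target_params|) (fun b => b.1 * p)).getD (0, 1)
      let actual := gt.1 * p
      let score := |actual - target_params|
      if score < st.2.2.2 ∨ (score = st.2.2.2 ∧ actual < st.2.2.1) then (u, gt.2, actual, score)
      else st)
    (1, 1, num_modules, |num_modules - target_params|)
  [("projection_dim", st.1), ("tie_factor", st.2.1), ("actual_params", st.2.2.1)]

-- ===== PRECONDITION & SPEC =====
def Spec_choose_budget_plan (num_modules : Int) (target_params : Int) (projection_dim_candidates : List Int) (out : List (String × Int)) : Prop := out = choose_budget_plan_alt num_modules target_params projection_dim_candidates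
instance (num_modules : Int) (target_params : Int) (projection_dim_candidates : List Int) (out : List (String × Int)) : Decidable (Spec_choose_budget_plan num_modules target_params projection_dim_candidates out) := by unfold Spec_choose_budget_plan; infer_instance

-- ===== CLAIM (what is proved, stated in full; the proofs are below) =====
def Claim_equal_choose_budget_plan : Prop := ∀ (num_modules : Int) (target_params : Int) (projection_dim_candidates : List Int), Dom_choose_budget_plan num_modules target_params projection_dim_candidates → Spec_choose_budget_plan num_modules target_params projection_dim_candidates (choose_budget_plan num_modules target_params projection_dim_candidates)

-- ===== LEMMAS AND PROOFS =====

def pvCeil (n b : Int) : Int := -(PySem.Int.floordiv (-n) b)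
theorem pvCeil_char (n b q : Int) (hb : 0 < b) : pvCeil n b = q ↔ (q - 1) * b < n ∧ n ≤ q * b :=
  PySem.Int.neg_floordiv_neg_eq_iff_of_pos hb
theorem pvCeil_self (n b q : Int) (hb : 0 < b) (h : pvCeil n b = q) : (q - 1) * b < n ∧ n ≤ q * b :=
  (pvCeil_char n b q hb).mp h
theorem pvCeil_pos (n b : Int) (hn : 1 ≤ n) (hb : 0 < b) : 1 ≤ pvCeil n b := by
  obtain ⟨h1, h2⟩ := pvCeil_self n b _ hb rfl
  nlinarith
theorem pvCeil_antitone (n b b' : Int) (hn : 1 ≤ n) (hb : 0 < b) (hbb : b ≤ b') :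
    pvCeil n b' ≤ pvCeil n b := by
  obtain ⟨h1, h2⟩ := pvCeil_self n b _ hb rfl
  obtain ⟨h1', h2'⟩ := pvCeil_self n b' _ (by omega) rfl
  have hq : 1 ≤ pvCeil n b := pvCeil_pos n b hn hb
  nlinarith

theorem pvBlocks_mem (n : Int) (hn : 1 ≤ n) (tie : Int) :
    ∀ p ∈ pvBlocksAux n tie, 1 ≤ p.2 ∧ p.2 ≤ n ∧ p.1 = pvCeil n p.2 := by
  induction tie using pvBlocksAux.induct (n := n) with
  | case1 tie2 hguard g ih =>
    intro p hp
    rw [pvBlocksAux, dif_pos hguard] at hp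
    rcases List.mem_cons.mp hp with h | h
    · subst h; exact ⟨hguard.1, hguard.2, rfl⟩
    · split at h
      · simp at h
      · rename_i hg1
        exact ih hg1 p h
  | case2 tie2 hguard =>
    intro p hp
    rw [pvBlocksAux, dif_neg hguard] at hp
    simp at hp

theorem pvCeil_block_const (n tie j : Int) (hn : 1 ≤ n) (htie : 1 ≤ tie) (hj : tie ≤ j)
    (hla : j * (pvCeil n tie - 1) ≤ n - 1) : pvCeil n j = pvCeil n tie := by
  have hg := pvCeil_pos n tie hn (by omega)
  have hq := pvCeil_self n j _ (by omega) rfl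
  have hanti := pvCeil_antitone n tie j hn (by omega) hj
  rcases lt_or_ge (pvCeil n j) (pvCeil n tie) with hlt | hge
  · exfalso; nlinarith [hq.2]
  · omega

theorem pvBlocks_cover (n : Int) (hn : 1 ≤ n) (tie : Int) :
    1 ≤ tie → ∀ j, tie ≤ j → j ≤ n → ∃ p ∈ pvBlocksAux n tie, p.1 = pvCeil n j ∧ p.2 ≤ j := by
  induction tie using pvBlocksAux.induct (n := n) with
  | case1 tie2 hguard g ih =>
    intro _ j hj1 hj2
    rw [pvBlocksAux, dif_pos hguard]
    have hg : g = pvCeil n tie2 := rfl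
    by_cases hg1 : g = 1
    · refine ⟨(g, tie2), List.mem_cons_self, ?_, hj1⟩
      have h1 : 1 ≤ pvCeil n j := pvCeil_pos n j hn (by omega)
      have h2 : pvCeil n j ≤ pvCeil n tie2 := pvCeil_antitone n tie2 j hn (by omega) hj1
      simp only []
      omega
    · have hg2 : 2 ≤ g := by
        have := pvCeil_pos n tie2 hn (by omega); omega
      rcases lt_or_ge j (PySem.Int.floordiv (n - 1) (g - 1) + 1) with hlt | hge
      · refine ⟨(g, tie2), List.mem_cons_self, ?_, hj1⟩
        have hla : j * (g - 1) ≤ n - 1 := by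
          have := (PySem.Int.le_floordiv_iff_mul_le (a := n - 1) (b := g - 1) (q := j) (by omega)).mp (by omega)
          linarith
        have := pvCeil_block_const n tie2 j hn hguard.1 hj1 (by rw [← hg]; exact hla)
        simp only []
        omega
      · have hnext1 : 1 ≤ PySem.Int.floordiv (n - 1) (g - 1) + 1 := by
          have := (PySem.Int.le_floordiv_iff_mul_le (a := n - 1) (b := g - 1) (q := 0) (by omega)).mpr (by omega)
          omega
        obtain ⟨p, hp, h1, h2⟩ := ih hg1 hnext1 j hge hj2
        exact ⟨p, List.mem_cons_of_mem _ (by rw [if_neg hg1]; exact hp), h1, h2⟩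
  | case2 tie2 hguard =>
    intro htie2 j hj1 hj2
    exact absurd ⟨htie2, hj1.trans hj2⟩ hguard

theorem pvBlocks_minrep (n : Int) (hn : 1 ≤ n) (tie : Int) :
    (∀ j, 1 ≤ j → j < tie → pvCeil n tie < pvCeil n j) →
    ∀ p ∈ pvBlocksAux n tie, ∀ j, 1 ≤ j → pvCeil n j = p.1 → p.2 ≤ j := by
  induction tie using pvBlocksAux.induct (n := n) with
  | case1 tie2 hguard g ih =>
    intro H p hp j hj1 hj2
    rw [pvBlocksAux, dif_pos hguard] at hp
    have hg : g = pvCeil n tie2 := rfl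
    rcases List.mem_cons.mp hp with rfl | hp
    · -- p = (g, tie2)
      by_contra hcon
      push_neg at hcon
      have := H j hj1 (by omega)
      simp only [] at hj2
      omega
    · rcases eq_or_ne g 1 with hg1 | hg1
      · rw [if_pos hg1] at hp; simp at hp
      · rw [if_neg hg1] at hp
        have hg2 : 2 ≤ g := by
          have := pvCeil_pos n tie2 hn (by omega); omega
        have hnext1 : 1 ≤ PySem.Int.floordiv (n - 1) (g - 1) + 1 := by
          have := (PySem.Int.le_floordiv_iff_mul_le (a := n - 1) (b := g - 1) (q := 0) (by omega)).mpr (by omega)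
          omega
        have hnmul : n ≤ (PySem.Int.floordiv (n - 1) (g - 1) + 1) * (g - 1) := by
          have := (PySem.Int.floordiv_lt_iff_lt_mul (a := n - 1) (b := g - 1)
            (q := PySem.Int.floordiv (n - 1) (g - 1) + 1) (by omega)).mp (by omega)
          linarith
        have hnextceil : pvCeil n (PySem.Int.floordiv (n - 1) (g - 1) + 1) ≤ g - 1 := by
          have hq := pvCeil_self n (PySem.Int.floordiv (n - 1) (g - 1) + 1) _ (by omega) rfl
          by_contra hcon
          push_neg at hcon
          nlinarith [hq.1]
        refine ih hg1 ?_ p hp j hj1 hj2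
        intro j' hj'1 hj'2
        rcases lt_or_ge j' tie2 with hlt | hge
        · have := H j' hj'1 hlt
          omega
        · have hla : j' * (g - 1) ≤ n - 1 := by
            have := (PySem.Int.le_floordiv_iff_mul_le (a := n - 1) (b := g - 1) (q := j') (by omega)).mp (by omega)
            linarith
          have := pvCeil_block_const n tie2 j' hn hguard.1 hge (by rw [← hg]; exact hla)
          omega
  | case2 tie2 hguard =>
    intro H p hp j hj1 hj2
    rw [pvBlocksAux, dif_neg hguard] at hp
    simp at hp

theorem pvBlocks_ne_nil (n : Int) (hn : 1 ≤ n) : pvBlocksAux n 1 ≠ [] := by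
  rw [pvBlocksAux, dif_pos ⟨le_refl 1, hn⟩]
  exact List.cons_ne_nil _ _

-- ===== Python's min(..., key=(k1, k2)): a left-biased lexicographic-minimum fold =====

def pvStep {α : Type} (k1 k2 : α → Int) (acc : Option α) (x : α) : Option α :=
  match acc with
  | none => some x
  | some m => if (decide (k1 x < k1 m) || (!decide (k1 m < k1 x) && decide (k2 x < k2 m))) = true then some x else some m

def pvLexLe {α : Type} (k1 k2 : α → Int) (m y : α) : Prop :=
  k1 m < k1 y ∨ (k1 m = k1 y ∧ k2 m ≤ k2 y)

theorem pvStep_fold {α : Type} (k1 k2 : α → Int) (xs : List α) :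
    ∀ (a m : α), xs.foldl (pvStep k1 k2) (some a) = some m →
      (m = a ∨ m ∈ xs) ∧ pvLexLe k1 k2 m a ∧ ∀ y ∈ xs, pvLexLe k1 k2 m y := by
  induction xs with
  | nil => intro a m h; simp at h; subst h
           exact ⟨Or.inl rfl, Or.inr ⟨rfl, le_refl _⟩, by simp⟩
  | cons x rest ih =>
    intro a m h
    simp only [List.foldl_cons] at h
    by_cases hc : (decide (k1 x < k1 a) || (!decide (k1 a < k1 x) && decide (k2 x < k2 a))) = true
    · rw [show pvStep k1 k2 (some a) x = some x by simp [pvStep, hc]] at h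
      obtain ⟨hm, hla, hall⟩ := ih x m h
      have hxa : pvLexLe k1 k2 x a := by
        simp only [Bool.or_eq_true, Bool.and_eq_true, decide_eq_true_eq, Bool.not_eq_true',
          decide_eq_false_iff_not] at hc
        unfold pvLexLe; omega
      refine ⟨by rcases hm with h'|h' <;> simp [h'], ?_, ?_⟩
      · unfold pvLexLe at *; omega
      · intro y hy
        rcases List.mem_cons.mp hy with h'|h'
        · subst h'; exact hla
        · exact hall y h'
    · rw [show pvStep k1 k2 (some a) x = some a by simp [pvStep, hc]] at h
      obtain ⟨hm, hla, hall⟩ := ih a m h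
      have hax : pvLexLe k1 k2 a x := by
        simp only [Bool.or_eq_true, Bool.and_eq_true, decide_eq_true_eq, Bool.not_eq_true',
          decide_eq_false_iff_not, not_or, not_and, not_lt] at hc
        unfold pvLexLe; omega
      refine ⟨by rcases hm with h'|h' <;> simp [h'], hla, ?_⟩
      intro y hy
      rcases List.mem_cons.mp hy with h'|h'
      · subst h'; unfold pvLexLe at *; omega
      · exact hall y h'

theorem pvMin2_spec {α : Type} (k1 k2 : α → Int) (x : α) (rest : List α) :
    ∃ m, PySem.List.min2? (x :: rest) k1 k2 = some m ∧ m ∈ x :: rest ∧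
      ∀ y ∈ x :: rest, pvLexLe k1 k2 m y := by
  have h0 : PySem.List.min2? (x :: rest) k1 k2 = rest.foldl (pvStep k1 k2) (some x) := rfl
  have hsome : ∀ (l : List α) (a : α), ∃ m, l.foldl (pvStep k1 k2) (some a) = some m := by
    intro l; induction l with
    | nil => intro a; exact ⟨a, rfl⟩
    | cons z zs ih => intro a
                      simp only [List.foldl_cons]
                      rcases hz : pvStep k1 k2 (some a) z with _ | b
                      · simp [pvStep] at hz; split at hz <;> simp at hz
                      · exact ih b
  obtain ⟨m, hm⟩ := hsome rest x
  obtain ⟨hmem, hla, hall⟩ := pvStep_fold k1 k2 rest x m hm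
  refine ⟨m, h0.trans hm, ?_, ?_⟩
  · rcases hmem with h'|h' <;> simp [h']
  · intro y hy
    rcases List.mem_cons.mp hy with h'|h'
    · subst h'; exact hla
    · exact hall y h'

-- ===== the (tie, actual) pair both inner computations produce, characterised =====

-- "(score, actual) of a is lexicographically no worse than of a'" (scores w.r.t. target t)
def pvLe (t a a' : Int) : Prop := |a - t| < |a' - t| ∨ (|a - t| = |a' - t| ∧ a ≤ a')

def pvIsBest (n u t tie a : Int) : Prop :=
  1 ≤ tie ∧ tie ≤ n ∧ a = estimate_trainable_params n u tie ∧
  (∀ j, 1 ≤ j → j ≤ n → pvLe t a (estimate_trainable_params n u j)) ∧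
  (∀ j, 1 ≤ j → j ≤ n → estimate_trainable_params n u j = a → tie ≤ j)

theorem pvIsBest_unique (n u t tie a tie' a' : Int)
    (h : pvIsBest n u t tie a) (h' : pvIsBest n u t tie' a') : tie = tie' ∧ a = a' := by
  obtain ⟨ht1, ht2, ha, hmin, hfirst⟩ := h
  obtain ⟨ht1', ht2', ha', hmin', hfirst'⟩ := h'
  have l1 := hmin tie' ht1' ht2'
  have l2 := hmin' tie ht1 ht2
  rw [← ha'] at l1; rw [← ha] at l2
  have haa : a = a' := by unfold pvLe at l1 l2; omega
  have k1 := hfirst tie' ht1' ht2' (by omega)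
  have k2 := hfirst' tie ht1 ht2 (by omega)
  omega

theorem pv_estimate_eq (n u j : Int) (hj : 1 ≤ j) :
    estimate_trainable_params n u j = pvCeil n j * max 1 u := by
  unfold estimate_trainable_params pvCeil
  rw [max_eq_right hj]

-- ===== A's inner loop computes pvIsBest =====

def pvAStep (n u t : Int) (st : Int × Int × Int) (tie : Int) : Int × Int × Int :=
  let actual := estimate_trainable_params n u tie
  let score := |actual - t|
  if score < st.2.2 ∨ (score = st.2.2 ∧ actual < st.2.1) then (tie, actual, score) else st

-- loop invariant of A's inner scan after the ties 1..m have been processed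
def pvInv (n u t m : Int) (st : Int × Int × Int) : Prop :=
  st.2.2 = |st.2.1 - t| ∧ 1 ≤ st.1 ∧ st.1 ≤ m ∧ st.2.1 = estimate_trainable_params n u st.1 ∧
  (∀ j, 1 ≤ j → j ≤ m → pvLe t st.2.1 (estimate_trainable_params n u j)) ∧
  (∀ j, 1 ≤ j → j ≤ m → estimate_trainable_params n u j = st.2.1 → st.1 ≤ j)

theorem pvAStep_preserve (n u t m : Int) (st : Int × Int × Int) (hm : 1 ≤ m)
    (h : pvInv n u t m st) : pvInv n u t (m + 1) (pvAStep n u t st (m + 1)) := by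
  obtain ⟨tie, a, s⟩ := st
  obtain ⟨h0, h1, h2, h3, h4, h5⟩ := h
  simp only at h0 h1 h2 h3 h4 h5
  subst h0
  unfold pvAStep
  dsimp only
  by_cases hc : |estimate_trainable_params n u (m + 1) - t| < |a - t| ∨
      (|estimate_trainable_params n u (m + 1) - t| = |a - t| ∧ estimate_trainable_params n u (m + 1) < a)
  · rw [if_pos hc]
    unfold pvInv
    dsimp only
    refine ⟨rfl, by omega, le_refl _, rfl, ?_, ?_⟩
    · intro j hj1 hj2
      rcases eq_or_lt_of_le hj2 with rfl | hlt
      · exact Or.inr ⟨rfl, le_refl _⟩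
      · have := h4 j hj1 (by omega)
        unfold pvLe at *
        omega
    · intro j hj1 hj2 hj3
      rcases eq_or_lt_of_le hj2 with rfl | hlt
      · exact le_refl _
      · exfalso
        have := h4 j hj1 (by omega)
        rw [hj3] at this
        unfold pvLe at this
        omega
  · rw [if_neg hc]
    unfold pvInv
    dsimp only
    refine ⟨rfl, h1, by omega, h3, ?_, ?_⟩
    · intro j hj1 hj2
      rcases eq_or_lt_of_le hj2 with rfl | hlt
      · unfold pvLe; omega
      · exact h4 j hj1 (by omega)
    · intro j hj1 hj2 hj3
      rcases eq_or_lt_of_le hj2 with rfl | hlt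
      · omega
      · exact h5 j hj1 (by omega) hj3

theorem pvA_fold (n u t : Int) (hn : 1 ≤ n) :
    ∀ m, 1 ≤ m → m ≤ n → pvInv n u t m ((PySem.List.pyRange 1 (m + 1) 1).foldl (pvAStep n u t)
      (1, estimate_trainable_params n u 1, |estimate_trainable_params n u 1 - t|)) := by
  intro m hm
  induction m, hm using Int.le_induction with
  | base =>
    intro _
    rw [PySem.List.pyRange_one_singleton]
    simp only [List.foldl_cons, List.foldl_nil]
    have hstep : pvAStep n u t
        (1, estimate_trainable_params n u 1, |estimate_trainable_params n u 1 - t|) 1 =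
        (1, estimate_trainable_params n u 1, |estimate_trainable_params n u 1 - t|) := by
      unfold pvAStep
      dsimp only
      rw [if_neg (by simp)]
    rw [hstep]
    unfold pvInv
    dsimp only
    refine ⟨rfl, le_refl _, le_refl _, rfl, ?_, ?_⟩
    · intro j hj1 hj2
      have : j = 1 := by omega
      subst this
      unfold pvLe; omega
    · intro j hj1 hj2 _
      omega
  | succ m hm ih =>
    intro hmn
    rw [PySem.List.pyRange_one_succ_right (by omega), List.foldl_append]
    simp only [List.foldl_cons, List.foldl_nil]
    exact pvAStep_preserve n u t m _ hm (ih (by omega))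

theorem pvA_inner (n u t : Int) (hn : 1 ≤ n) :
    pvIsBest n u t (choose_tie_factor_for_budget n u t).1 (choose_tie_factor_for_budget n u t).2 := by
  have hn0 : ¬ n ≤ 0 := by omega
  have hch : choose_tie_factor_for_budget n u t =
      (((PySem.List.pyRange 1 (n + 1) 1).foldl (pvAStep n u t)
         (1, estimate_trainable_params n u 1, |estimate_trainable_params n u 1 - t|)).1,
       ((PySem.List.pyRange 1 (n + 1) 1).foldl (pvAStep n u t)
         (1, estimate_trainable_params n u 1, |estimate_trainable_params n u 1 - t|)).2.1) := by
    rw [choose_tie_factor_for_budget, if_neg hn0]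
    rfl
  obtain ⟨h0, h1, h2, h3, h4, h5⟩ := pvA_fold n u t hn n (by omega) (le_refl n)
  rw [hch]
  exact ⟨h1, h2, h3, h4, h5⟩

-- ===== B's inner minimum computes pvIsBest =====

theorem pvB_inner (n u t : Int) (hn : 1 ≤ n)
    (gt : Int × Int)
    (hgt : gt = (PySem.List.min2? (pvBlocksAux n 1)
      (fun b => |b.1 * max 1 u - t|) (fun b => b.1 * max 1 u)).getD (0, 1)) :
    pvIsBest n u t gt.2 (gt.1 * max 1 u) := by
  have hp1 : (1 : Int) ≤ max 1 u := le_max_left 1 u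
  obtain ⟨x, rest, hxs⟩ : ∃ x rest, pvBlocksAux n 1 = x :: rest := by
    rcases h : pvBlocksAux n 1 with _ | ⟨x, rest⟩
    · exact absurd h (pvBlocks_ne_nil n hn)
    · exact ⟨x, rest, rfl⟩
  obtain ⟨m, hm, hmem, hall⟩ := pvMin2_spec (fun b => |b.1 * max 1 u - t|)
    (fun b => b.1 * max 1 u) x rest
  rw [hxs, hm] at hgt
  simp only [Option.getD_some] at hgt
  subst hgt
  rw [← hxs] at hmem hall
  obtain ⟨hm1, hm2, hm3⟩ := pvBlocks_mem n hn 1 gt hmem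
  refine ⟨hm1, hm2, ?_, ?_, ?_⟩
  · rw [pv_estimate_eq n u gt.2 hm1, ← hm3]
  · intro j hj1 hj2
    obtain ⟨p, hp, hp1', hp2'⟩ := pvBlocks_cover n hn 1 le_rfl j hj1 hj2
    have := hall p hp
    unfold pvLexLe at this
    rw [pv_estimate_eq n u j hj1, ← hp1']
    unfold pvLe
    omega
  · intro j hj1 hj2 hj3
    rw [pv_estimate_eq n u j hj1] at hj3
    have hceq : pvCeil n j = gt.1 := by
      have := mul_right_cancel₀ (b := max 1 u) (by omega) hj3
      omega
    exact pvBlocks_minrep n hn 1 (fun j' _ hlt => absurd hlt (by omega)) gt hmem j hj1 hceq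

-- the two inner computations agree (all n)
theorem pv_inner_eq (n u t : Int) :
    choose_tie_factor_for_budget n u t =
      (((PySem.List.min2? (if n ≤ 0 then [((0:Int),(1:Int))] else pvBlocksAux n 1)
          (fun b => |b.1 * max 1 u - t|) (fun b => b.1 * max 1 u)).getD (0, 1)).2,
       ((PySem.List.min2? (if n ≤ 0 then [((0:Int),(1:Int))] else pvBlocksAux n 1)
          (fun b => |b.1 * max 1 u - t|) (fun b => b.1 * max 1 u)).getD (0, 1)).1 * max 1 u) := by
  by_cases hn0 : n ≤ 0
  · rw [choose_tie_factor_for_budget, if_pos hn0]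
    simp only [if_pos hn0]
    have hmin : PySem.List.min2? [((0:Int),(1:Int))]
        (fun b => |b.1 * max 1 u - t|) (fun b => b.1 * max 1 u) = some (0, 1) := rfl
    rw [hmin]
    simp
  · simp only [if_neg hn0]
    have hB := pvB_inner n u t (by omega)
      ((PySem.List.min2? (pvBlocksAux n 1)
        (fun b => |b.1 * max 1 u - t|) (fun b => b.1 * max 1 u)).getD (0, 1)) rfl
    have hA := pvA_inner n u t (by omega)
    have uniq := pvIsBest_unique n u t _ _ _ _ hA hB
    exact Prod.ext uniq.1 uniq.2

-- ===== the outer folds agree =====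

theorem pv_dict_items (d ti a : Int) :
    (PySem.Dict.ofList [("projection_dim", d), ("tie_factor", ti), ("actual_params", a)]).items
      = [("projection_dim", d), ("tie_factor", ti), ("actual_params", a)] := rfl

theorem pv_dict_getD (d ti a : Int) :
    (PySem.Dict.ofList [("projection_dim", d), ("tie_factor", ti), ("actual_params", a)]).getD
      "actual_params" 0 = a := rfl

theorem pv_estimate_one (n : Int) : estimate_trainable_params n 1 1 = n := by
  unfold estimate_trainable_params
  rw [PySem.Int.floordiv_eq_ediv_of_pos (by norm_num)]
  simp

-- the loop bodies of the two outer folds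
def pvOuterA (n t : Int) (st : PySem.Dict String Int × Int) (u : Int) : PySem.Dict String Int × Int :=
  let ta := choose_tie_factor_for_budget n u t
  let score := |ta.2 - t|
  if score < st.2 ∨ (score = st.2 ∧ ta.2 < st.1.getD "actual_params" 0) then
    (PySem.Dict.ofList
      [("projection_dim", u), ("tie_factor", ta.1), ("actual_params", ta.2)], score)
  else st

def pvOuterB (n t : Int) (st : Int × Int × Int × Int) (u : Int) : Int × Int × Int × Int :=
  let p := max 1 u
  let gt := (PySem.List.min2? (if n ≤ 0 then [((0 : Int), (1 : Int))] else pvBlocksAux n 1)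
    (fun b => |b.1 * p - t|) (fun b => b.1 * p)).getD (0, 1)
  let actual := gt.1 * p
  let score := |actual - t|
  if score < st.2.2.2 ∨ (score = st.2.2.2 ∧ actual < st.2.2.1) then (u, gt.2, actual, score)
  else st

def pvDictOf (b : Int × Int × Int × Int) : PySem.Dict String Int :=
  PySem.Dict.ofList [("projection_dim", b.1), ("tie_factor", b.2.1), ("actual_params", b.2.2.1)]

theorem pvOuter_step (n t : Int) (b : Int × Int × Int × Int) (u : Int) :
    pvOuterA n t (pvDictOf b, b.2.2.2) u = (pvDictOf (pvOuterB n t b u), (pvOuterB n t b u).2.2.2) := by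
  obtain ⟨d, ti, a, sc⟩ := b
  unfold pvOuterA pvOuterB pvDictOf
  rw [pv_inner_eq n u t]
  dsimp only
  rw [pv_dict_getD]
  by_cases hc : |((PySem.List.min2? (if n ≤ 0 then [((0 : Int), (1 : Int))] else pvBlocksAux n 1)
      (fun b => |b.1 * max 1 u - t|) (fun b => b.1 * max 1 u)).getD (0, 1)).1 * max 1 u - t| < sc ∨
      (|((PySem.List.min2? (if n ≤ 0 then [((0 : Int), (1 : Int))] else pvBlocksAux n 1)
      (fun b => |b.1 * max 1 u - t|) (fun b => b.1 * max 1 u)).getD (0, 1)).1 * max 1 u - t| = sc ∧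
      ((PySem.List.min2? (if n ≤ 0 then [((0 : Int), (1 : Int))] else pvBlocksAux n 1)
      (fun b => |b.1 * max 1 u - t|) (fun b => b.1 * max 1 u)).getD (0, 1)).1 * max 1 u < a)
  · rw [if_pos hc, if_pos hc]
  · rw [if_neg hc, if_neg hc]

theorem pv_outer (n t : Int) (cands : List Int) :
    ∀ b : Int × Int × Int × Int,
      cands.foldl (pvOuterA n t) (pvDictOf b, b.2.2.2) =
        (pvDictOf (cands.foldl (pvOuterB n t) b), (cands.foldl (pvOuterB n t) b).2.2.2) := by
  induction cands with
  | nil => intro b; rfl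
  | cons u cs ih =>
    intro b
    simp only [List.foldl_cons]
    rw [pvOuter_step n t b u]
    exact ih (pvOuterB n t b u)

-- ===== VERDICT (by name: the statement is the Claim_ definition above) =====
theorem choose_budget_plan_spec : Claim_equal_choose_budget_plan := by
  unfold Claim_equal_choose_budget_plan Spec_choose_budget_plan
  intro n t cands _
  have hA : choose_budget_plan n t cands =
      (cands.foldl (pvOuterA n t) (pvDictOf (1, 1, n, |n - t|), |n - t|)).1.items := by
    rw [choose_budget_plan]
    rw [show estimate_trainable_params n 1 1 = n from pv_estimate_one n]
    rfl
  have hB : choose_budget_plan_alt n t cands =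
      [("projection_dim", (cands.foldl (pvOuterB n t) (1, 1, n, |n - t|)).1),
       ("tie_factor", (cands.foldl (pvOuterB n t) (1, 1, n, |n - t|)).2.1),
       ("actual_params", (cands.foldl (pvOuterB n t) (1, 1, n, |n - t|)).2.2.1)] := rfl
  rw [hA, hB, show (|n - t| : Int) = ((1, 1, n, |n - t|) : Int × Int × Int × Int).2.2.2 from rfl,
    pv_outer n t cands (1, 1, n, |n - t|)]
  exact pv_dict_items _ _ _
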